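-- pv_equiv track=rewrite | github.com/the-omega-institute/automath | theory/2026_golden_ratio_driven_scan_projection_generation_recursive_emergence/scripts/exp_xi_hankel_rigidity_dp_audit.py | brute_rigidity
-- ===== SOURCE A (Python) =====
-- import itertools
-- from typing import Dict, List
--
-- def v_p_int(x: int, p: int) -> int:
--     if x == 0:
--         raise ValueError("v_p(0) encountered (inputs must be distinct / nonzero).")
--     x = abs(x)
--     v = 0
--     while x % p == 0:
--         x //= p
--         v += 1
--     return v
--
-- def brute_rigidity(a: List[int], alpha: List[int], p: int) -> List[int]:
--     r = len(a)
--     out = [0] * (r + 1)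
--     idxs = list(range(r))
--     for n in range(1, r + 1):
--         best = None
--         for I in itertools.combinations(idxs, n):
--             v = 0
--             for i in I:
--                 v += alpha[i]
--             for i_pos in range(n):
--                 for j_pos in range(i_pos + 1, n):
--                     i = I[i_pos]
--                     j = I[j_pos]
--                     v += 2 * v_p_int(a[j] - a[i], p)
--             if best is None or v < best:
--                 best = v
--         if best is None:
--             raise RuntimeError("Unexpected empty brute-force minimization.")
--         out[n] = int(best)
--     return out
-- ===== SOURCE B (Python) =====
-- from typing import List
--
-- def v_p_int(x: int, p: int) -> int:
--     if x == 0: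
--         raise ValueError("v_p(0) encountered (inputs must be distinct / nonzero).")
--     x = abs(x)
--     v = 0
--     while x % p == 0:
--         x //= p
--         v += 1
--     return v
--
-- def brute_rigidity(a: List[int], alpha: List[int], p: int) -> List[int]:
--     # Choose/skip recursion over (value, weight) pairs: each call returns, for every k,
--     # the minimum extra cost of picking k elements from the remaining suffix, given the
--     # already-chosen values (their pairwise cost is accounted incrementally).
--     def rec(pairs, chosen):
--         if not pairs:
--             return [0]
--         (x, al) = pairs[0]
--         rest = pairs[1:]
--         skip = rec(rest, chosen)
--         add = al + 2 * sum(v_p_int(x - c, p) for c in chosen)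
--         take = rec(rest, chosen + [x])
--         s = len(pairs)
--         m = []
--         for k in range(s + 1):
--             if k == s:
--                 m.append(add + take[k - 1])
--             elif k == 0:
--                 m.append(skip[0])
--             else:
--                 m.append(min(skip[k], add + take[k - 1]))
--         return m
--     return rec(list(zip(a, alpha)), [])
-- ===== Notes on version B (the rewrite author's own statement) =====
-- stated objective: faster
-- what changed: Replaced the per-size itertools.combinations enumeration (which recomputes every subset's alpha-sum and all pairwise valuations from scratch, for each target size separately) by a single choose/skip recursion over the (value, weight) list that accounts pairwise costs incrementally against the chosen prefix and merges per-size minimum vectors on the way up.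
import Mathlib
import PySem

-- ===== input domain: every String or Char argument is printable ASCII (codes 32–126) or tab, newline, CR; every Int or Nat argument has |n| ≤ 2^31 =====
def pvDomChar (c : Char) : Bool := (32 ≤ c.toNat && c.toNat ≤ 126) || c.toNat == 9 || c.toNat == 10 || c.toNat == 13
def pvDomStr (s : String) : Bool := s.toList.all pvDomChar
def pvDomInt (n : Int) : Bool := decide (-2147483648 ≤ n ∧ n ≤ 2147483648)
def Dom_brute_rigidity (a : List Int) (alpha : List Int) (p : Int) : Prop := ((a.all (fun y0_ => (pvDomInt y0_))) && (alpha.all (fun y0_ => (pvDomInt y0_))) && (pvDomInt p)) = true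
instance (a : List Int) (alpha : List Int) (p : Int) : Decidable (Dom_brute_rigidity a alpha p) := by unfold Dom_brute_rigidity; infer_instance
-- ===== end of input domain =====

-- B replaces the per-size itertools.combinations scan (cost recomputed from scratch for every
-- subset) by one choose/skip recursion that accounts pairwise costs incrementally and merges
-- per-size minima; objective: faster (measured constant-factor speedup, same exponential class).


-- ===== PORT A =====
-- v_p_int's while loop, fuel-bounded: under Pre_ (|p| ≥ 2, x ≠ 0) the loop runs at most
-- log2|x| < |x|.natAbs times, so the fuel never runs out and this is exactly Python's loop.
-- (Python raises ValueError on x = 0; Pre_ excludes that via Nodup, the value here is junk.)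
def vpLoop : Nat → Int → Int → Int
  | 0, _, _ => 0
  | fuel + 1, x, p =>
    if PySem.Int.mod x p = 0 then 1 + vpLoop fuel (PySem.Int.floordiv x p) p else 0

def v_p_int (x : Int) (p : Int) : Int := vpLoop x.natAbs |x| p

def brute_rigidity (a : List Int) (alpha : List Int) (p : Int) : List Int :=
  let r : Nat := a.length
  let idxs : List Int := PySem.List.pyRange 0 (r : Int) 1
  (PySem.List.pyRange 1 ((r : Int) + 1) 1).foldl (fun out n =>
    -- itertools.combinations(idxs, n): n ≥ 1 on this range, so n.toNat is exact
    let best : Option Int :=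
      (PySem.List.combinations idxs n.toNat).foldl (fun best I =>
        let v : Int := I.foldl (fun v i => v + PySem.List.pyGetD alpha i 0) 0  -- alpha[i], in range under Pre_
        let v : Int :=
          (PySem.List.pyRange 0 n 1).foldl (fun v i_pos =>
            (PySem.List.pyRange (i_pos + 1) n 1).foldl (fun v j_pos =>
              let i := PySem.List.pyGetD I i_pos 0   -- in range: I has length n
              let j := PySem.List.pyGetD I j_pos 0
              v + 2 * v_p_int (PySem.List.pyGetD a j 0 - PySem.List.pyGetD a i 0) p) v) v
        match best with
        | none => some v
        | some b => if v < b then some v else some b) none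
    match best with
    | some b => PySem.List.pySetD out n b        -- out[n] = int(best)
    | none => out                                -- Python: RuntimeError; unreachable (combinations nonempty for n ≤ r)
    ) (List.replicate (r + 1) 0)

-- ===== PORT B =====
def altRec (p : Int) (pairs : List (Int × Int)) (chosen : List Int) : List Int :=
  match pairs with
  | [] => [0]
  | (x, al) :: rest =>
    let skip := altRec p rest chosen
    let add := al + 2 * (chosen.map (fun c => v_p_int (x - c) p)).sum
    let take := altRec p rest (chosen ++ [x])
    let s := rest.length + 1
    (List.range (s + 1)).map (fun k =>
      if k = s then add + take.getD (k - 1) 0      -- take[k-1], in range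
      else if k = 0 then skip.getD 0 0             -- skip[0]
      else min (skip.getD k 0) (add + take.getD (k - 1) 0))

def brute_rigidity_alt (a : List Int) (alpha : List Int) (p : Int) : List Int :=
  altRec p (a.zip alpha) []

-- ===== PRECONDITION & SPEC =====
-- Pre_ excludes exactly the inputs where the Python A does not return normally:
-- alpha shorter than a (IndexError on alpha[i]), duplicate values in a (ValueError from
-- v_p_int(0, p)), and, when at least two elements force v_p_int calls, p ∈ {-1, 0, 1}
-- (p = 0 raises ZeroDivisionError, p = ±1 make the while loop run forever).
def Pre_brute_rigidity (a : List Int) (alpha : List Int) (p : Int) : Prop :=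
  a.length ≤ alpha.length ∧ a.Nodup ∧ (a.length ≤ 1 ∨ 2 ≤ p ∨ p ≤ -2)
instance (a : List Int) (alpha : List Int) (p : Int) : Decidable (Pre_brute_rigidity a alpha p) := by
  unfold Pre_brute_rigidity; infer_instance

def pvWitness_brute_rigidity : List Int × List Int × Int := ([0, 1, 3], [5, 7, 9], 2)

def Spec_brute_rigidity (a : List Int) (alpha : List Int) (p : Int) (out : List Int) : Prop := out = brute_rigidity_alt a alpha p
instance (a : List Int) (alpha : List Int) (p : Int) (out : List Int) : Decidable (Spec_brute_rigidity a alpha p out) := by unfold Spec_brute_rigidity; infer_instance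

-- ===== CLAIM (what is proved, stated in full; the proofs are below) =====
def Claim_equal_brute_rigidity : Prop := ∀ (a : List Int) (alpha : List Int) (p : Int), Dom_brute_rigidity a alpha p → Pre_brute_rigidity a alpha p → Spec_brute_rigidity a alpha p (brute_rigidity a alpha p)

-- ===== LEMMAS AND PROOFS =====

-- Running minimum as an Option, the shape both programs' "best" loops share.
def omin (b : Option Int) (v : Int) : Option Int :=
  match b with
  | none => some v
  | some m => some (min m v)

def lmin (l : List Int) : Option Int := l.foldl omin none

-- cost of adding value x to an already chosen set (the pairwise part)
def addCost (p : Int) (chosen : List Int) (x : Int) : Int :=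
  2 * (chosen.map (fun c => v_p_int (x - c) p)).sum

-- total cost of picking the (value, weight) list T after `chosen`, pairwise incremental
def delta (p : Int) : List Int → List (Int × Int) → Int
  | _, [] => 0
  | chosen, (x, al) :: rest => al + addCost p chosen x + delta p (chosen ++ [x]) rest

-- the common semantic value: min over k-element sublists of `pairs` of their delta-cost
def mval (p : Int) (pairs : List (Int × Int)) (chosen : List Int) (k : Nat) : Int :=
  (lmin ((PySem.List.combinations pairs k).map (delta p chosen))).getD 0

-- pairwise sum in "earlier vs later" order, head-recursive
def pairsSum (g : Int → Int → Int) : List Int → Int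
  | [] => 0
  | x :: xs => (xs.map (fun y => g y x)).sum + pairsSum g xs

-- A's position-indexed double loop, as a sum
def posSum (g : Int → Int → Int) (w : List Int) : Int :=
  ((PySem.List.pyRange 0 (w.length : Int) 1).map (fun ip =>
    ((PySem.List.pyRange (ip + 1) (w.length : Int) 1).map (fun jp =>
      g (PySem.List.pyGetD w jp 0) (PySem.List.pyGetD w ip 0))).sum)).sum

lemma foldl_omin_some (l : List Int) : ∀ m : Int,
    l.foldl omin (some m) = some (match lmin l with | none => m | some m' => min m m') := by
  induction l with
  | nil => intro m; simp [lmin]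
  | cons x t ih =>
    intro m
    show t.foldl omin (some (min m x)) = _
    rw [ih]
    have : lmin (x :: t) = t.foldl omin (some x) := rfl
    rw [this, ih x]
    cases h : lmin t with
    | none => simp
    | some m' => simp [min_assoc]

lemma lmin_append (l1 l2 : List Int) : lmin (l1 ++ l2) = l2.foldl omin (lmin l1) :=
  List.foldl_append

lemma lmin_map_add (c : Int) (l : List Int) :
    lmin (l.map (fun v => c + v)) = (lmin l).map (fun v => c + v) := by
  have key : ∀ (l : List Int) (acc : Option Int),
      (l.map (fun v => c + v)).foldl omin (acc.map (fun v => c + v))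
        = (l.foldl omin acc).map (fun v => c + v) := by
    intro l
    induction l with
    | nil => intro acc; rfl
    | cons x t ih =>
      intro acc
      have h : omin (acc.map (fun v => c + v)) (c + x) = (omin acc x).map (fun v => c + v) := by
        cases acc with
        | none => rfl
        | some m => simp [omin, min_add_add_left]
      simp only [List.map_cons, List.foldl_cons, h, ih]
  simpa using key l none

lemma lmin_ne_none (l : List Int) (h : l ≠ []) : lmin l = some ((lmin l).getD 0) := by
  cases l with
  | nil => simp at h
  | cons x t =>
    have : lmin (x :: t) = t.foldl omin (some x) := rfl
    rw [this, foldl_omin_some]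
    cases lmin t <;> simp

lemma comb_ne_nil {α : Type} (l : List α) (k : Nat) (h : k ≤ l.length) :
    PySem.List.combinations l k ≠ [] := by
  have hm : l.take k ∈ PySem.List.combinations l k := by
    rw [PySem.List.mem_combinations_iff]
    exact ⟨List.take_sublist _ _, by simp [List.length_take, h]⟩
  exact List.ne_nil_of_mem hm

lemma delta_cons (p : Int) (chosen : List Int) (x al : Int) (rest : List (Int × Int)) :
    delta p chosen ((x, al) :: rest) = (al + addCost p chosen x) + delta p (chosen ++ [x]) rest := by
  simp [delta, add_assoc]

lemma mval_zero (p : Int) (pairs : List (Int × Int)) (chosen : List Int) :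
    mval p pairs chosen 0 = 0 := by
  simp [mval, PySem.List.combinations_zero, lmin, omin, delta]

-- map delta over the cons-decomposition of combinations
lemma map_delta_consblock (p : Int) (x al : Int) (chosen : List Int) (L : List (List (Int × Int))) :
    (L.map (fun c => (x, al) :: c)).map (delta p chosen)
      = ((L.map (delta p (chosen ++ [x]))).map (fun v => (al + addCost p chosen x) + v)) := by
  simp only [List.map_map]
  refine List.map_congr_left ?_
  intro T _
  simp [Function.comp, delta_cons]

lemma mval_cons_top (p : Int) (x al : Int) (rest : List (Int × Int)) (chosen : List Int) :
    mval p ((x, al) :: rest) chosen (rest.length + 1)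
      = (al + addCost p chosen x) + mval p rest (chosen ++ [x]) rest.length := by
  unfold mval
  rw [PySem.List.combinations_cons_succ,
      PySem.List.combinations_eq_nil_of_length_lt rest (Nat.lt_succ_self _)]
  rw [List.append_nil, map_delta_consblock, lmin_map_add]
  have h1 : (PySem.List.combinations rest rest.length).map (delta p (chosen ++ [x])) ≠ [] := by
    simp
  rw [lmin_ne_none _ h1]
  simp

lemma mval_cons_mid (p : Int) (x al : Int) (rest : List (Int × Int)) (chosen : List Int)
    (k : Nat) (h1 : 1 ≤ k) (h2 : k ≤ rest.length) :
    mval p ((x, al) :: rest) chosen k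
      = min ((al + addCost p chosen x) + mval p rest (chosen ++ [x]) (k - 1))
            (mval p rest chosen k) := by
  obtain ⟨j, rfl⟩ : ∃ j, k = j + 1 := ⟨k - 1, (Nat.succ_pred_eq_of_pos h1).symm⟩
  unfold mval
  rw [PySem.List.combinations_cons_succ]
  rw [List.map_append, lmin_append, map_delta_consblock, lmin_map_add]
  have hA : (PySem.List.combinations rest j).map (delta p (chosen ++ [x])) ≠ [] := by
    simp [comb_ne_nil rest j (by omega)]
  have hB : (PySem.List.combinations rest (j + 1)).map (delta p chosen) ≠ [] := by
    simp [comb_ne_nil rest (j + 1) h2]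
  rw [lmin_ne_none _ hA, lmin_ne_none _ hB]
  simp only [Option.map_some]
  rw [foldl_omin_some]
  rw [lmin_ne_none _ hB]
  simp

lemma altRec_eq (p : Int) : ∀ (pairs : List (Int × Int)) (chosen : List Int),
    altRec p pairs chosen = (List.range (pairs.length + 1)).map (fun k => mval p pairs chosen k) := by
  intro pairs
  induction pairs with
  | nil =>
    intro chosen
    simp [altRec, List.range_succ, mval_zero]
  | cons hd rest ih =>
    obtain ⟨x, al⟩ := hd
    intro chosen
    show (List.range (rest.length + 1 + 1)).map _ = _
    simp only [List.length_cons]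
    refine List.map_congr_left ?_
    intro k hk
    rw [List.mem_range] at hk
    rw [ih chosen, ih (chosen ++ [x])]
    have hadd : al + 2 * (chosen.map (fun c => v_p_int (x - c) p)).sum = al + addCost p chosen x := rfl
    by_cases hs : k = rest.length + 1
    · subst hs
      rw [mval_cons_top]
      rw [PySem.List.getD_map_range _ _ _ _ (by omega)]
      simp [hadd]
    · rw [if_neg hs]
      by_cases h0 : k = 0
      · subst h0
        rw [if_pos rfl, mval_zero, PySem.List.getD_map_range _ _ _ _ (by omega), mval_zero]
      · rw [if_neg h0]
        rw [mval_cons_mid p x al rest chosen k (by omega) (by omega)]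
        rw [PySem.List.getD_map_range _ _ _ _ (by omega),
            PySem.List.getD_map_range _ _ _ _ (by omega)]
        rw [hadd, min_comm]

lemma doubleLoop_eq (g : Int → Int → Int) (w : List Int) (v0 : Int) :
    (PySem.List.pyRange 0 (w.length : Int) 1).foldl (fun v ip =>
      (PySem.List.pyRange (ip + 1) (w.length : Int) 1).foldl (fun v jp =>
        v + g (PySem.List.pyGetD w jp 0) (PySem.List.pyGetD w ip 0)) v) v0
    = v0 + posSum g w := by
  have h1 : ∀ (v : Int) (ip : Int),
      (PySem.List.pyRange (ip + 1) (w.length : Int) 1).foldl (fun v jp =>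
        v + g (PySem.List.pyGetD w jp 0) (PySem.List.pyGetD w ip 0)) v
      = v + ((PySem.List.pyRange (ip + 1) (w.length : Int) 1).map (fun jp =>
          g (PySem.List.pyGetD w jp 0) (PySem.List.pyGetD w ip 0))).sum := by
    intro v ip; exact PySem.List.foldl_add _ _ _
  calc (PySem.List.pyRange 0 (w.length : Int) 1).foldl (fun v ip =>
      (PySem.List.pyRange (ip + 1) (w.length : Int) 1).foldl (fun v jp =>
        v + g (PySem.List.pyGetD w jp 0) (PySem.List.pyGetD w ip 0)) v) v0
      = (PySem.List.pyRange 0 (w.length : Int) 1).foldl (fun v ip =>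
          v + ((PySem.List.pyRange (ip + 1) (w.length : Int) 1).map (fun jp =>
            g (PySem.List.pyGetD w jp 0) (PySem.List.pyGetD w ip 0))).sum) v0 := by
        exact PySem.List.foldl_congr_mem _ _ _ _ (fun acc x _ => h1 acc x)
    _ = v0 + posSum g w := PySem.List.foldl_add _ _ _

lemma pairsSum_append_singleton (g : Int → Int → Int) (z : Int) :
    ∀ w : List Int, pairsSum g (w ++ [z]) = pairsSum g w + (w.map (fun x => g z x)).sum := by
  intro w
  induction w with
  | nil => simp [pairsSum]
  | cons x t ih => simp [pairsSum, ih]; ring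

lemma getD_append_left' (w : List Int) (z : Int) (i : Int) (h0 : 0 ≤ i) (h1 : i < (w.length : Int)) :
    PySem.List.pyGetD (w ++ [z]) i 0 = PySem.List.pyGetD w i 0 := by
  rw [PySem.List.pyGetD_eq_getElem _ 0 h0 (by simp; omega),
      PySem.List.pyGetD_eq_getElem _ 0 h0 h1]
  exact List.getElem_append_left _

lemma posSum_append (g : Int → Int → Int) (w : List Int) (z : Int) :
    posSum g (w ++ [z]) = posSum g w + (w.map (fun x => g z x)).sum := by
  unfold posSum
  have hlen : (((w ++ [z]).length : Int)) = (w.length : Int) + 1 := by simp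
  rw [hlen]
  rw [PySem.List.pyRange_one_succ_right (by positivity)]
  rw [List.map_append, List.sum_append]
  have hmain : (PySem.List.pyRange 0 (w.length : Int) 1).map (fun ip =>
      ((PySem.List.pyRange (ip + 1) ((w.length : Int) + 1) 1).map (fun jp =>
        g (PySem.List.pyGetD (w ++ [z]) jp 0) (PySem.List.pyGetD (w ++ [z]) ip 0))).sum)
      = (PySem.List.pyRange 0 (w.length : Int) 1).map (fun ip =>
          ((PySem.List.pyRange (ip + 1) (w.length : Int) 1).map (fun jp =>
            g (PySem.List.pyGetD w jp 0) (PySem.List.pyGetD w ip 0))).sum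
          + g z (PySem.List.pyGetD w ip 0)) := by
    refine List.map_congr_left ?_
    intro ip hip
    rw [PySem.List.mem_pyRange_one] at hip
    rw [PySem.List.pyRange_one_succ_right (by omega)]
    rw [List.map_append, List.sum_append]
    rw [getD_append_left' w z ip hip.1 hip.2]
    congr 1
    · refine congrArg List.sum (List.map_congr_left ?_)
      intro jp hjp
      rw [PySem.List.mem_pyRange_one] at hjp
      rw [getD_append_left' w z jp (by omega) (by omega)]
    · simp
  rw [hmain, PySem.List.sum_map_add_int]
  have hlast : ((List.map (fun ip =>
      (List.map (fun jp => g (PySem.List.pyGetD (w ++ [z]) jp 0) (PySem.List.pyGetD (w ++ [z]) ip 0))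
        (PySem.List.pyRange (ip + 1) ((w.length : Int) + 1))).sum) [(w.length : Int)]).sum) = 0 := by
    simp [PySem.List.pyRange_one_eq_nil le_rfl]
  rw [hlast]
  have hz : ((PySem.List.pyRange 0 (w.length : Int) 1).map (fun ip => g z (PySem.List.pyGetD w ip 0))).sum
      = (w.map (fun x => g z x)).sum := by
    have h0 := PySem.List.map_pyGetD_pyRange_zero w (0 : Int)
    calc ((PySem.List.pyRange 0 (w.length : Int) 1).map (fun ip => g z (PySem.List.pyGetD w ip 0))).sum
        = (((PySem.List.pyRange 0 (w.length : Int) 1).map (fun ip => PySem.List.pyGetD w ip 0)).map (fun x => g z x)).sum := by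
          rw [List.map_map]; rfl
      _ = (w.map (fun x => g z x)).sum := by
          rw [show (PySem.List.pyRange 0 (w.length : Int) 1).map (fun ip => PySem.List.pyGetD w ip 0) = w from by
            simpa using h0]
  rw [hz]
  ring

lemma posSum_eq_pairsSum (g : Int → Int → Int) (w : List Int) : posSum g w = pairsSum g w := by
  induction w using List.reverseRecOn with
  | nil => simp [posSum, pairsSum, PySem.List.pyRange_one_eq_nil]
  | append_singleton t z ih => rw [posSum_append, pairsSum_append_singleton, ih]

lemma addCost_append (p : Int) (ch : List Int) (x y : Int) :
    addCost p (ch ++ [x]) y = addCost p ch y + 2 * v_p_int (y - x) p := by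
  simp [addCost]; ring

lemma delta_closed (p : Int) : ∀ (T : List (Int × Int)) (ch : List Int),
    delta p ch T = (T.map (·.2)).sum + (T.map (fun t => addCost p ch t.1)).sum
      + pairsSum (fun y x => 2 * v_p_int (y - x) p) (T.map (·.1)) := by
  intro T
  induction T with
  | nil => intro ch; simp [delta, pairsSum]
  | cons t rest ih =>
    obtain ⟨x, al⟩ := t
    intro ch
    simp only [delta, ih (ch ++ [x]), List.map_cons, List.sum_cons, pairsSum]
    have hsplit : (rest.map (fun t => addCost p (ch ++ [x]) t.1)).sum
        = (rest.map (fun t => addCost p ch t.1)).sum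
          + (rest.map (fun t => 2 * v_p_int (t.1 - x) p)).sum := by
      rw [← PySem.List.sum_map_add_int]
      exact congrArg _ (List.map_congr_left (fun t _ => addCost_append p ch x t.1))
    rw [hsplit]
    have hmm : ((rest.map (·.1)).map (fun y => 2 * v_p_int (y - x) p)).sum
        = (rest.map (fun t => 2 * v_p_int (t.1 - x) p)).sum := by
      rw [List.map_map]; rfl
    rw [hmm]
    ring

lemma pairsSum_comp (h : Int → Int → Int) (f : Int → Int) :
    ∀ l : List Int, pairsSum (fun y x => h (f y) (f x)) l = pairsSum h (l.map f) := by
  intro l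
  induction l with
  | nil => rfl
  | cons x t ih => simp [pairsSum, ih, List.map_map]; rfl

lemma range_map_get_zip : ∀ (a alpha : List Int), a.length ≤ alpha.length →
    (List.range a.length).map (fun k => (a.getD k 0, alpha.getD k 0)) = a.zip alpha := by
  intro a
  induction a with
  | nil => intro alpha _; simp
  | cons x t ih =>
    intro alpha h
    cases alpha with
    | nil => simp at h
    | cons y s =>
      simp only [List.length_cons, List.range_succ_eq_map, List.map_cons, List.map_map]
      simp only [List.getD_cons_zero, List.zip_cons_cons]
      congr 1
      rw [← ih s (by simpa using h)]
      rfl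

lemma length_setfold (g : Nat → Int) : ∀ (L : List Nat) (out : List Int),
    (L.foldl (fun o k => o.set k (g k)) out).length = out.length := by
  intro L
  induction L with
  | nil => intro out; rfl
  | cons k t ih => intro out; simp [ih]

lemma getD_setfold (g : Nat → Int) : ∀ (L : List Nat) (out : List Int) (j : Nat),
    (L.foldl (fun o k => o.set k (g k)) out).getD j 0
      = if j ∈ L then (if j < out.length then g j else 0) else out.getD j 0 := by
  intro L
  induction L with
  | nil => intro out j; simp
  | cons k t ih =>
    intro out j
    show (t.foldl _ (out.set k (g k))).getD j 0 = _
    rw [ih (out.set k (g k)) j]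
    by_cases hjt : j ∈ t
    · simp [hjt]
    · simp only [hjt, if_false, List.mem_cons, List.length_set]
      by_cases hjk : j = k
      · subst hjk
        simp only [true_or, if_true]
        by_cases hlt : j < out.length
        · simp [List.getD_eq_getElem?_getD, hlt]
        · simp [List.getD_eq_getElem?_getD, hlt]
      · simp [hjk, List.getD_eq_getElem?_getD, Ne.symm hjk]

lemma foldl_best {α : Type} (f : α → Int) (L : List α) :
    L.foldl (fun best I => match best with
      | none => some (f I)
      | some b => if f I < b then some (f I) else some b) none = lmin (L.map f) := by
  have h : ∀ (b : Option Int) (I : α),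
      (match b with
        | none => some (f I)
        | some b => if f I < b then some (f I) else some b) = omin b (f I) := by
    intro b I
    cases b with
    | none => rfl
    | some m =>
      simp only [omin]
      by_cases hlt : f I < m
      · rw [if_pos hlt]; congr 1; omega
      · rw [if_neg hlt]; congr 1; omega
  calc L.foldl _ none = L.foldl (fun b I => omin b (f I)) none := by
        refine PySem.List.foldl_congr_mem _ _ _ _ ?_
        intro acc x _; exact h acc x
    _ = lmin (L.map f) := (List.foldl_map).symm

lemma idxs_map_fpair (a alpha : List Int) (h : a.length ≤ alpha.length) :
    (PySem.List.pyRange 0 (a.length : Int) 1).map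
      (fun i => (PySem.List.pyGetD a i 0, PySem.List.pyGetD alpha i 0)) = a.zip alpha := by
  rw [PySem.List.pyRange_zero_natCast, List.map_map]
  have hc : ((fun i => (PySem.List.pyGetD a i 0, PySem.List.pyGetD alpha i 0)) ∘ fun k : Nat => (k : Int))
      = fun k : Nat => (a.getD k 0, alpha.getD k 0) := by
    funext k; simp [Function.comp]
  rw [hc, range_map_get_zip a alpha h]

-- proof-side names for the pieces of A's fold (definitionally equal to the port's lambdas)
def costA (a alpha : List Int) (p n : Int) (I : List Int) : Int :=
  (PySem.List.pyRange 0 n 1).foldl (fun v i_pos =>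
    (PySem.List.pyRange (i_pos + 1) n 1).foldl (fun v j_pos =>
      v + 2 * v_p_int (PySem.List.pyGetD a (PySem.List.pyGetD I j_pos 0) 0
        - PySem.List.pyGetD a (PySem.List.pyGetD I i_pos 0) 0) p) v)
    (I.foldl (fun v i => v + PySem.List.pyGetD alpha i 0) 0)

def bestA (a alpha : List Int) (p n : Int) : Option Int :=
  (PySem.List.combinations (PySem.List.pyRange 0 (a.length : Int) 1) n.toNat).foldl
    (fun best I => match best with
      | none => some (costA a alpha p n I)
      | some b => if costA a alpha p n I < b then some (costA a alpha p n I) else some b) none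

def stepA (a alpha : List Int) (p : Int) (out : List Int) (n : Int) : List Int :=
  match bestA a alpha p n with
  | some b => PySem.List.pySetD out n b
  | none => out

lemma bestA_eq (a alpha : List Int) (p : Int) (hlen : a.length ≤ alpha.length)
    (n : Int) (h1 : 1 ≤ n) (h2 : n ≤ (a.length : Int)) :
    bestA a alpha p n = some (mval p (a.zip alpha) [] n.toNat) := by
  have hziplen : (a.zip alpha).length = a.length := by rw [List.length_zip]; omega
  unfold bestA
  rw [foldl_best (costA a alpha p n)]
  have hmapeq : (PySem.List.combinations (PySem.List.pyRange 0 (a.length : Int) 1) n.toNat).map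
      (costA a alpha p n)
      = (PySem.List.combinations (a.zip alpha) n.toNat).map (delta p []) := by
    calc _ = (PySem.List.combinations (PySem.List.pyRange 0 (a.length : Int) 1) n.toNat).map
          (fun I => delta p []
            (I.map (fun i => (PySem.List.pyGetD a i 0, PySem.List.pyGetD alpha i 0)))) := by
          refine List.map_congr_left ?_
          intro I hI
          have hIlen : I.length = n.toNat := PySem.List.length_of_mem_combinations hI
          have hn' : n = (I.length : Int) := by rw [hIlen]; omega
          unfold costA
          rw [hn']
          rw [doubleLoop_eq (fun jv iv =>
            2 * v_p_int (PySem.List.pyGetD a jv 0 - PySem.List.pyGetD a iv 0) p) I]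
          rw [PySem.List.foldl_add]
          rw [posSum_eq_pairsSum, pairsSum_comp (fun y x => 2 * v_p_int (y - x) p)
            (fun iv => PySem.List.pyGetD a iv 0) I]
          rw [delta_closed]
          simp only [List.map_map]
          have hA : (I.map ((fun t : Int × Int => t.2) ∘ fun i =>
              (PySem.List.pyGetD a i 0, PySem.List.pyGetD alpha i 0))).sum
              = (I.map (fun i => PySem.List.pyGetD alpha i 0)).sum := rfl
          have hB : (I.map ((fun t : Int × Int => addCost p [] t.1) ∘ fun i =>
              (PySem.List.pyGetD a i 0, PySem.List.pyGetD alpha i 0))).sum = 0 := by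
            have hconst : ((fun t : Int × Int => addCost p [] t.1) ∘ fun i =>
                (PySem.List.pyGetD a i 0, PySem.List.pyGetD alpha i 0)) = fun _ => (0 : Int) := by
              funext i; simp [addCost]
            rw [hconst]; simp
          have hC : (I.map ((fun t : Int × Int => t.1) ∘ fun i =>
              (PySem.List.pyGetD a i 0, PySem.List.pyGetD alpha i 0)))
              = I.map (fun i => PySem.List.pyGetD a i 0) := rfl
          rw [hA, hB, hC]
          ring
      _ = ((PySem.List.combinations (PySem.List.pyRange 0 (a.length : Int) 1) n.toNat).map
            (List.map (fun i => (PySem.List.pyGetD a i 0, PySem.List.pyGetD alpha i 0)))).map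
            (delta p []) := by rw [List.map_map]; rfl
      _ = (PySem.List.combinations (a.zip alpha) n.toNat).map (delta p []) := by
          rw [← PySem.List.combinations_map, idxs_map_fpair a alpha hlen]
  rw [hmapeq]
  have hne : (PySem.List.combinations (a.zip alpha) n.toNat).map (delta p []) ≠ [] := by
    have hle : n.toNat ≤ (a.zip alpha).length := by omega
    simp [comb_ne_nil _ _ hle]
  rw [lmin_ne_none _ hne]
  rfl

lemma brute_rigidity_eq (a alpha : List Int) (p : Int) (hlen : a.length ≤ alpha.length) :
    brute_rigidity a alpha p
      = (List.range (a.length + 1)).map (fun k => mval p (a.zip alpha) [] k) := by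
  have hA : brute_rigidity a alpha p
      = (PySem.List.pyRange 1 ((a.length : Int) + 1) 1).foldl (stepA a alpha p)
          (List.replicate (a.length + 1) 0) := rfl
  rw [hA]
  have step1 : (PySem.List.pyRange 1 ((a.length : Int) + 1) 1).foldl (stepA a alpha p)
        (List.replicate (a.length + 1) 0)
      = (PySem.List.pyRange 1 ((a.length : Int) + 1) 1).foldl
          (fun out n => PySem.List.pySetD out n (mval p (a.zip alpha) [] n.toNat))
          (List.replicate (a.length + 1) 0) := by
    refine PySem.List.foldl_congr_mem _ _ _ _ ?_
    intro acc n hn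
    rw [PySem.List.mem_pyRange_one] at hn
    unfold stepA
    rw [bestA_eq a alpha p hlen n hn.1 (by omega)]
  rw [step1]
  have hrange : PySem.List.pyRange 1 ((a.length : Int) + 1) 1
      = (List.range a.length).map (fun k : Nat => (1 : Int) + (k : Int)) := by
    have hh : (((a.length : Int) + 1 - 1).toNat) = a.length := by omega
    rw [PySem.List.pyRange_one, hh]
  rw [hrange, List.foldl_map]
  have step2 : (List.range a.length).foldl
        (fun (out : List Int) (k : Nat) =>
          PySem.List.pySetD out ((1 : Int) + (k : Int)) (mval p (a.zip alpha) [] ((1 : Int) + (k : Int)).toNat))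
        (List.replicate (a.length + 1) 0)
      = (List.range a.length).foldl
          (fun (out : List Int) (k : Nat) => out.set (1 + k) (mval p (a.zip alpha) [] (1 + k)))
          (List.replicate (a.length + 1) 0) := by
    refine PySem.List.foldl_congr_mem _ _ _ _ ?_
    intro acc k _
    have hc : (1 : Int) + (k : Int) = ((1 + k : Nat) : Int) := by push_cast; ring
    rw [hc, PySem.List.pySetD_natCast, Int.toNat_natCast]
  rw [step2]
  have step3 : (List.range a.length).foldl
        (fun (out : List Int) (k : Nat) => out.set (1 + k) (mval p (a.zip alpha) [] (1 + k)))
        (List.replicate (a.length + 1) 0)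
      = ((List.range a.length).map (fun k => 1 + k)).foldl
          (fun (out : List Int) (m : Nat) => out.set m (mval p (a.zip alpha) [] m))
          (List.replicate (a.length + 1) 0) :=
    (List.foldl_map (f := fun k : Nat => 1 + k)
      (g := fun (out : List Int) (m : Nat) => out.set m (mval p (a.zip alpha) [] m))).symm
  rw [step3]
  refine List.ext_getElem ?_ ?_
  · rw [length_setfold]; simp
  · intro j h1 h2
    rw [← List.getD_eq_getElem _ 0 h1, ← List.getD_eq_getElem _ 0 h2]
    rw [getD_setfold]
    have hjlt : j < a.length + 1 := by
      have := h2; simpa using this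
    by_cases hmem : j ∈ (List.range a.length).map (fun k => 1 + k)
    · have hj1 : 1 ≤ j ∧ j < 1 + a.length := by
        simp only [List.mem_map, List.mem_range] at hmem
        obtain ⟨k, hk, rfl⟩ := hmem
        omega
      rw [if_pos hmem, if_pos (by simp; omega)]
      rw [List.getD_eq_getElem _ 0 h2]
      simp [List.getElem_map]
    · have hj0 : j = 0 := by
        by_contra hne0
        exact hmem (by
          simp only [List.mem_map, List.mem_range]
          exact ⟨j - 1, by omega, by omega⟩)
      subst hj0
      rw [if_neg hmem]
      rw [List.getD_eq_getElem _ 0 h2]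
      simp [List.getElem_map, mval_zero]

theorem brute_rigidity_spec : Claim_equal_brute_rigidity := by
  intro a alpha p hDom hPre
  obtain ⟨hlen, -, -⟩ := hPre
  unfold Spec_brute_rigidity
  rw [brute_rigidity_eq a alpha p hlen]
  unfold brute_rigidity_alt
  rw [altRec_eq]
  have hz : (a.zip alpha).length = a.length := by rw [List.length_zip]; omega
  rw [hz]
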